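-- pv_equiv track=rewrite | github.com/DannyJung23/Coin-Detector | coin_detection_v1.py | computeErosion5x5CircularSE
-- ===== SOURCE A (Python) =====
-- def createInitializedGreyscalePixelArray(image_width, image_height, initValue = 0):
--     new_pixel_array = []
--     for _ in range(image_height):
--         new_row = []
--         for _ in range(image_width):
--             new_row.append(initValue)
--         new_pixel_array.append(new_row)
--
--     return new_pixel_array
--
-- def computeErosion5x5CircularSE(pixel_array, image_width, image_height):
--
--     eroded_pixel_array = createInitializedGreyscalePixelArray(image_width, image_height)
--
--     # 5x5 Circular SE
--     kernel = [[0, 0, 1, 0, 0],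
--               [0, 1, 1, 1, 0],
--               [1, 1, 1, 1, 1],
--               [0, 1, 1, 1, 0],
--               [0, 0, 1, 0, 0]]
--
--     # BorderZeroPadding 5x5
--     for i in range(image_height):
--         pixel_array[i].append(0)
--         pixel_array[i].append(0)
--         pixel_array[i].insert(0, 0)
--         pixel_array[i].insert(0, 0)
--     pixel_array.append([0] * (image_width + 4))
--     pixel_array.append([0] * (image_width + 4))
--     pixel_array.insert(0, ([0] * (image_width + 4)))
--     pixel_array.insert(0, ([0] * (image_width + 4)))
--
--     # Fit check with 5x5 Circular SE
--     for i in range(2, image_height+2):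
--         for j in range(2, image_width+2):
--
--             eroded_value = 255
--             for k in range(-2, 3):
--                 for l in range(-2, 3):
--
--                     if pixel_array[i+k][j+l] == 0 and kernel[k+2][l+2] == 1:
--                         eroded_value = 0
--
--             eroded_pixel_array[i-2][j-2] = eroded_value
--
--     return eroded_pixel_array
-- ===== SOURCE B (Python) =====
-- # Scatter-based erosion: walk the (virtually zero-padded) image once and, for each
-- # zero cell, stamp zeros through the 13 "on" offsets of the 5x5 circular SE into an
-- # all-255 output grid.  Unlike A it does NOT mutate pixel_array (A pads it in place);
-- # the return value is identical on proper image_height x image_width arrays.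
--
-- KERNEL_OFFSETS = [(0, 2),
--                   (1, 1), (1, 2), (1, 3),
--                   (2, 0), (2, 1), (2, 2), (2, 3), (2, 4),
--                   (3, 1), (3, 2), (3, 3),
--                   (4, 2)]
--
-- def computeErosion5x5CircularSE(pixel_array, image_width, image_height):
--     eroded = [[255] * image_width for _ in range(image_height)]
--     for a in range(image_height + 4):
--         for b in range(image_width + 4):
--             if 2 <= a < image_height + 2 and 2 <= b < image_width + 2:
--                 v = pixel_array[a - 2][b - 2]
--             else:
--                 v = 0
--             if v == 0:
--                 for (k, l) in KERNEL_OFFSETS: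
--                     oa = a - k
--                     ob = b - l
--                     if 0 <= oa < image_height and 0 <= ob < image_width:
--                         eroded[oa][ob] = 0
--     return eroded
-- ===== Notes on version B (the rewrite author's own statement) =====
-- stated objective: alternative
-- what changed: Replaces A's in-place border padding plus per-output-pixel 5x5 gather (25 kernel tests per pixel) by a single pass over the virtually zero-padded image that, for each zero cell, scatters zeros through the 13 'on' offsets of the circular structuring element into an all-255 grid; B does not mutate pixel_array (A pads it in place).
-- outside the precondition, e.g. on computeErosion5x5CircularSE([[255], [255]], 1, 1): A raises IndexError, B returns [[0]]
import Mathlib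
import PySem

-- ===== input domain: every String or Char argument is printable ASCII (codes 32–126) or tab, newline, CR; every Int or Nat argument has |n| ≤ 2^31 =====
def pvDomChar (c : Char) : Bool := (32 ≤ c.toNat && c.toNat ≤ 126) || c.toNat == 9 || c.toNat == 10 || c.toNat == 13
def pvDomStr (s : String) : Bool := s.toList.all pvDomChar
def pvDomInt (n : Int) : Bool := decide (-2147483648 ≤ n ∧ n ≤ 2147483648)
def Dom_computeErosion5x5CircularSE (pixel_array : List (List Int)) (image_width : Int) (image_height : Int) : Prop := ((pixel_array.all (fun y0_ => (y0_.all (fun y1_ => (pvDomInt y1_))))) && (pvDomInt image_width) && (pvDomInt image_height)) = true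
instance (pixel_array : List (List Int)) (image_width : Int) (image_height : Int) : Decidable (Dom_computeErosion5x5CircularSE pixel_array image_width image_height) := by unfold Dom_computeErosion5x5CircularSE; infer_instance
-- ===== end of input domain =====

-- B replaces A's per-pixel 5x5 gather over an in-place-padded copy by a single scatter
-- pass (each zero cell stamps the 13 circular-SE offsets into an all-255 grid);
-- equal return values on proper images — A additionally mutates pixel_array (pads it
-- in place), which B does not do; the claim is about the return value.

-- ===== PORT A =====
def createInitializedGreyscalePixelArray (image_width : Int) (image_height : Int) (initValue : Int) : List (List Int) :=
  (PySem.List.pyRange 0 image_height 1).foldl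
    (fun new_pixel_array _ =>
      new_pixel_array ++
        [(PySem.List.pyRange 0 image_width 1).foldl (fun new_row _ => new_row ++ [initValue]) []])
    []

def computeErosion5x5CircularSE (pixel_array : List (List Int)) (image_width : Int) (image_height : Int) : List (List Int) :=
  let eroded0 := createInitializedGreyscalePixelArray image_width image_height 0
  let kernel : List (List Int) := [[0,0,1,0,0],[0,1,1,1,0],[1,1,1,1,1],[0,1,1,1,0],[0,0,1,0,0]]
  -- BorderZeroPadding 5x5 (the Python mutates pixel_array in place; the port threads the list)
  let pa := (PySem.List.pyRange 0 image_height 1).foldl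
    (fun pa i =>
      let row := PySem.List.pyGetD pa i []
      let row := row ++ [0]
      let row := row ++ [0]
      let row := PySem.List.insert row 0 0
      let row := PySem.List.insert row 0 0
      PySem.List.pySetD pa i row) pixel_array
  let pa := pa ++ [PySem.List.pyRepeat [0] (image_width + 4)]
  let pa := pa ++ [PySem.List.pyRepeat [0] (image_width + 4)]
  let pa := PySem.List.insert pa 0 (PySem.List.pyRepeat [0] (image_width + 4))
  let pa := PySem.List.insert pa 0 (PySem.List.pyRepeat [0] (image_width + 4))
  -- Fit check with 5x5 Circular SE
  (PySem.List.pyRange 2 (image_height + 2) 1).foldl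
    (fun eroded i =>
      (PySem.List.pyRange 2 (image_width + 2) 1).foldl
        (fun eroded j =>
          let eroded_value := (PySem.List.pyRange (-2) 3 1).foldl
            (fun ev k =>
              (PySem.List.pyRange (-2) 3 1).foldl
                (fun ev l =>
                  if PySem.List.pyGetD (PySem.List.pyGetD pa (i + k) []) (j + l) 0 = 0 ∧
                     PySem.List.pyGetD (PySem.List.pyGetD kernel (k + 2) []) (l + 2) 0 = 1
                  then 0 else ev) ev) 255
          PySem.List.pySetD eroded (i - 2)
            (PySem.List.pySetD (PySem.List.pyGetD eroded (i - 2) []) (j - 2) eroded_value))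
        eroded)
    eroded0

-- ===== PORT B =====
def kernelOffsets : List (Int × Int) :=
  [(0, 2), (1, 1), (1, 2), (1, 3), (2, 0), (2, 1), (2, 2), (2, 3), (2, 4), (3, 1), (3, 2), (3, 3), (4, 2)]

def computeErosion5x5CircularSE_alt (pixel_array : List (List Int)) (image_width : Int) (image_height : Int) : List (List Int) :=
  let eroded := (PySem.List.pyRange 0 image_height 1).map (fun _ => PySem.List.pyRepeat [255] image_width)
  (PySem.List.pyRange 0 (image_height + 4) 1).foldl
    (fun eroded a =>
      (PySem.List.pyRange 0 (image_width + 4) 1).foldl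
        (fun eroded b =>
          let v := if 2 ≤ a ∧ a < image_height + 2 ∧ 2 ≤ b ∧ b < image_width + 2
                   then PySem.List.pyGetD (PySem.List.pyGetD pixel_array (a - 2) []) (b - 2) 0
                   else 0
          if v = 0 then
            kernelOffsets.foldl
              (fun eroded kl =>
                let oa := a - kl.1
                let ob := b - kl.2
                if 0 ≤ oa ∧ oa < image_height ∧ 0 ≤ ob ∧ ob < image_width then
                  PySem.List.pySetD eroded oa (PySem.List.pySetD (PySem.List.pyGetD eroded oa []) ob 0)
                else eroded)
              eroded
          else eroded)
        eroded)
    eroded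

-- ===== PRECONDITION & SPEC =====
-- Pre_ admits the degenerate dimensions (image_height ≤ 0, or image_width ≤ 0 with enough
-- rows for the padding loop) and, for positive dimensions, proper images: exactly
-- image_height rows of exactly image_width pixels each.  On other shapes A raises
-- IndexError or (for wider rows) its in-place padding makes it read pixels beyond
-- image_width — an accident of the padding that B does not reproduce.
def Pre_computeErosion5x5CircularSE (pixel_array : List (List Int)) (image_width : Int) (image_height : Int) : Prop :=
  image_height ≤ 0 ∨
    (image_width ≤ 0 ∧ image_height.toNat ≤ pixel_array.length) ∨
    (0 < image_width ∧ 0 < image_height ∧ pixel_array.length = image_height.toNat ∧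
      ∀ row ∈ pixel_array, row.length = image_width.toNat)
instance (pixel_array : List (List Int)) (image_width : Int) (image_height : Int) : Decidable (Pre_computeErosion5x5CircularSE pixel_array image_width image_height) := by unfold Pre_computeErosion5x5CircularSE; infer_instance

def pvWitness_computeErosion5x5CircularSE : List (List Int) × Int × Int := ([[0, 255], [255, 255]], 2, 2)

def Spec_computeErosion5x5CircularSE (pixel_array : List (List Int)) (image_width : Int) (image_height : Int) (out : List (List Int)) : Prop := out = computeErosion5x5CircularSE_alt pixel_array image_width image_height
instance (pixel_array : List (List Int)) (image_width : Int) (image_height : Int) (out : List (List Int)) : Decidable (Spec_computeErosion5x5CircularSE pixel_array image_width image_height out) := by unfold Spec_computeErosion5x5CircularSE; infer_instance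

-- ===== CLAIM (what is proved, stated in full; the proofs are below) =====
def Claim_equal_computeErosion5x5CircularSE : Prop := ∀ (pixel_array : List (List Int)) (image_width : Int) (image_height : Int), Dom_computeErosion5x5CircularSE pixel_array image_width image_height → Pre_computeErosion5x5CircularSE pixel_array image_width image_height → Spec_computeErosion5x5CircularSE pixel_array image_width image_height (computeErosion5x5CircularSE pixel_array image_width image_height)

-- ===== LEMMAS AND PROOFS =====

-- fold that only ever writes 0
theorem foldl_ifzero {γ : Type} (P : γ → Prop) [DecidablePred P] :
    ∀ (L : List γ) (acc : Int),
      L.foldl (fun ev x => if P x then 0 else ev) acc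
        = if L.any (fun x => decide (P x)) then 0 else acc := by
  intro L
  induction L with
  | nil => intro acc; simp
  | cons x L ih =>
    intro acc
    simp only [List.foldl_cons, ih, List.any_cons]
    by_cases hx : P x <;> by_cases hL : L.any (fun y => decide (P y)) = true <;> simp [hx, hL]

-- fold over range(off+|pre|, off+|pre|+|xs|) overwriting cell (i-off) once each
theorem foldl_overwrite {α : Type} (f : Int → α → α) (d : α) (off : Int) :
    ∀ (xs pre : List α),
      (PySem.List.pyRange (off + pre.length) (off + pre.length + xs.length) 1).foldl
          (fun s i => PySem.List.pySetD s (i - off) (f i (PySem.List.pyGetD s (i - off) d)))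
          (pre ++ xs)
        = pre ++ (List.range xs.length).map (fun (t : Nat) => f (off + pre.length + (t : Int)) (xs.getD t d)) := by
  intro xs
  induction xs with
  | nil => intro pre; simp [PySem.List.pyRange_one_eq_nil]
  | cons x xs ih =>
    intro pre
    rw [PySem.List.pyRange_one_cons (by simp only [List.length_cons]; push_cast; omega)]
    simp only [List.foldl_cons]
    have harith : (off + (pre.length : Int)) - off = ((pre.length : Nat) : Int) := by ring
    rw [harith, PySem.List.pyGetD_natCast, PySem.List.pySetD_natCast]
    have hget : (pre ++ x :: xs).getD pre.length d = x := by
      simp [List.getD]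
    have hset : (pre ++ x :: xs).set pre.length (f (off + pre.length) x) = pre ++ f (off + pre.length) x :: xs := by
      rw [List.set_append_right _ _ (Nat.le_refl _)]
      simp
    rw [hget, hset]
    have hpre : (pre ++ f (off + pre.length) x :: xs) = (pre ++ [f (off + pre.length) x]) ++ xs := by simp
    rw [hpre,
        show (off + (pre.length:Int) + ((x::xs).length : Int)) = off + ((pre ++ [f (off + pre.length) x]).length : Int) + (xs.length : Int) by simp; omega,
        show (off + (pre.length:Int) + 1) = off + ((pre ++ [f (off + pre.length) x]).length : Int) by simp; omega]
    rw [ih (pre ++ [f (off + pre.length) x])]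
    simp only [List.length_cons]
    rw [List.range_succ_eq_map, List.map_cons, List.map_map]
    simp only [List.append_assoc, List.singleton_append, List.length_append, List.length_cons,
      List.length_nil, List.getD_cons_zero]
    have htail : List.map (fun (t : Nat) => f (off + ((pre.length + (0 + 1) : Nat) : Int) + (t : Int)) (xs.getD t d)) (List.range xs.length)
        = List.map ((fun (t : Nat) => f (off + (pre.length : Int) + (t : Int)) ((x :: xs).getD t d)) ∘ Nat.succ) (List.range xs.length) := by
      apply List.map_congr_left
      intro t _
      simp only [Function.comp_apply, List.getD_cons_succ]
      congr 1
      push_cast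
      ring
    rw [htail]
    norm_num

-- 2-d access with Python default semantics (indices are nonnegative wherever this is used)
def get2 (g : List (List Int)) (i j : Int) : Int :=
  PySem.List.pyGetD (PySem.List.pyGetD g i []) j 0

theorem get2_nat (g : List (List Int)) (i j : Nat) :
    get2 g (i : Int) (j : Int) = (g.getD i []).getD j 0 := by
  simp [get2]

-- the virtually padded image: padded coordinates (a, b), original pixel at (a-2, b-2)
def vf (pixel : List (List Int)) (w h : Int) (a b : Int) : Int :=
  if 2 ≤ a ∧ a < h + 2 ∧ 2 ≤ b ∧ b < w + 2 then get2 pixel (a - 2) (b - 2) else 0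

def padRow (r : List Int) : List Int := 0 :: 0 :: (r ++ [0] ++ [0])

def zrow (w : Int) : List Int := PySem.List.pyRepeat [0] (w + 4)

theorem getD_zrow (w : Int) (c : Nat) : (zrow w).getD c 0 = 0 := by
  unfold zrow
  rw [PySem.List.pyRepeat_singleton, List.getD_eq_getElem?_getD, List.getElem?_replicate]
  split_ifs <;> simp

theorem getD_padRow (r : List Int) (cn : Nat) :
    (padRow r).getD cn 0
      = if 2 ≤ cn ∧ cn < r.length + 2 then r.getD (cn - 2) 0 else 0 := by
  unfold padRow
  match cn with
  | 0 => rw [if_neg (by omega)]; rfl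
  | 1 => rw [if_neg (by omega)]; rfl
  | (cn + 2) =>
    simp only [List.getD_cons_succ]
    rw [List.getD_eq_getElem?_getD]
    by_cases hcn : cn < r.length
    · rw [List.getElem?_append_left (by simp; omega), List.getElem?_append_left hcn,
        if_pos (by omega), List.getElem?_eq_getElem hcn]
      simp [List.getD_eq_getElem?_getD, List.getElem?_eq_getElem hcn]
    · rw [if_neg (by omega)]
      by_cases hcn2 : cn < r.length + 1
      · rw [List.getElem?_append_left (by simp; omega), List.getElem?_append_right (by omega)]
        have : cn - r.length = 0 := by omega
        rw [this]
        rfl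
      · by_cases hcn3 : cn < r.length + 2
        · rw [List.getElem?_append_right (by simp; omega)]
          have : cn - ((r ++ [0]).length) = 0 := by simp; omega
          rw [this]
          rfl
        · rw [List.getElem?_eq_none (by simp; omega)]
          rfl

theorem get2_padded (pixel : List (List Int)) (w h : Int) (hh : 0 ≤ h)
    (hlen : pixel.length = h.toNat) (hrows : ∀ r ∈ pixel, r.length = w.toNat)
    (tn cn : Nat) :
    get2 (zrow w :: zrow w :: (pixel.map padRow ++ [zrow w, zrow w])) (tn : Int) (cn : Int)
      = vf pixel w h (tn : Int) (cn : Int) := by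
  rw [get2_nat]
  unfold vf
  match tn with
  | 0 => rw [if_neg (by omega)]; simpa using getD_zrow w cn
  | 1 => rw [if_neg (by omega)]; simpa using getD_zrow w cn
  | (tn + 2) =>
    simp only [List.getD_cons_succ]
    by_cases htn : tn < pixel.length
    · have hrow : (List.map padRow pixel ++ [zrow w, zrow w]).getD tn [] = padRow pixel[tn] := by
        rw [List.getD_eq_getElem?_getD, List.getElem?_append_left (by simpa using htn),
          List.getElem?_map, List.getElem?_eq_getElem htn]
        rfl
      rw [hrow]
      have hrlen : (pixel[tn]).length = w.toNat := hrows _ (List.getElem_mem htn)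
      rw [getD_padRow]
      by_cases hcnd : 2 ≤ cn ∧ cn < (pixel[tn]).length + 2
      · rw [if_pos hcnd, if_pos (by push_cast; omega)]
        obtain ⟨cn', rfl⟩ : ∃ cn', cn = cn' + 2 := ⟨cn - 2, by omega⟩
        rw [show ((tn + 2 : Nat) : Int) - 2 = ((tn : Nat) : Int) by push_cast; ring,
          show ((cn' + 2 : Nat) : Int) - 2 = ((cn' : Nat) : Int) by push_cast; ring,
          get2_nat]
        rw [show (pixel.getD tn []) = pixel[tn] by
              rw [List.getD_eq_getElem?_getD, List.getElem?_eq_getElem htn]; rfl,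
            show cn' + 2 - 2 = cn' from rfl]
      · rw [if_neg hcnd, if_neg (by push_cast; omega)]
    · rw [if_neg (by push_cast; omega)]
      by_cases htn2 : tn < pixel.length + 1
      · have hrow : (List.map padRow pixel ++ [zrow w, zrow w]).getD tn [] = zrow w := by
          rw [List.getD_eq_getElem?_getD, List.getElem?_append_right (by simpa using htn),
            show tn - (List.map padRow pixel).length = 0 by simp; omega]
          rfl
        rw [hrow, getD_zrow]
      · by_cases htn3 : tn < pixel.length + 2
        · have hrow : (List.map padRow pixel ++ [zrow w, zrow w]).getD tn [] = zrow w := by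
            rw [List.getD_eq_getElem?_getD, List.getElem?_append_right (by simpa using htn),
              show tn - (List.map padRow pixel).length = 1 by simp; omega]
            rfl
          rw [hrow, getD_zrow]
        · have hrow : (List.map padRow pixel ++ [zrow w, zrow w]).getD tn [] = [] := by
            rw [List.getD_eq_getElem?_getD, List.getElem?_eq_none (by simp; omega)]
            rfl
          rw [hrow]
          rfl

def Shape (h' w' : Nat) (g : List (List Int)) : Prop :=
  g.length = h' ∧ ∀ r ∈ g, r.length = w'

-- a conditional-zero-write fold, characterised pointwise
theorem scatter_fold {γ : Type} (h' w' : Nat) (step : List (List Int) → γ → List (List Int))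
    (Hit : γ → Nat → Nat → Bool)
    (hstep : ∀ g c, Shape h' w' g → Shape h' w' (step g c) ∧
      ∀ i j, i < h' → j < w' →
        get2 (step g c) (i : Int) (j : Int) = if Hit c i j then 0 else get2 g (i : Int) (j : Int)) :
    ∀ (L : List γ) (g : List (List Int)), Shape h' w' g →
      Shape h' w' (L.foldl step g) ∧
      ∀ i j, i < h' → j < w' →
        get2 (L.foldl step g) (i : Int) (j : Int)
          = if L.any (fun c => Hit c i j) then 0 else get2 g (i : Int) (j : Int) := by
  intro L
  induction L with
  | nil => intro g hg; refine ⟨hg, ?_⟩; intro i j _ _; simp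
  | cons c L ih =>
    intro g hg
    obtain ⟨hg', hc⟩ := hstep g c hg
    obtain ⟨hsh, hget⟩ := ih (step g c) hg'
    refine ⟨hsh, ?_⟩
    intro i j hi hj
    rw [List.foldl_cons, hget i j hi hj, hc i j hi hj, List.any_cons]
    by_cases h1 : Hit c i j <;> by_cases h2 : L.any (fun d => Hit d i j) = true <;>
      simp [h1, h2]

-- writing 0 at cell (pn, qn)
theorem get2_write (h' w' : Nat) (g : List (List Int)) (hg : Shape h' w' g)
    (pn qn : Nat) (hp : pn < h') (hq : qn < w') :
    Shape h' w' (PySem.List.pySetD g (pn : Int)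
        (PySem.List.pySetD (PySem.List.pyGetD g (pn : Int) []) (qn : Int) 0)) ∧
    ∀ i j : Nat, i < h' → j < w' →
      get2 (PySem.List.pySetD g (pn : Int)
          (PySem.List.pySetD (PySem.List.pyGetD g (pn : Int) []) (qn : Int) 0)) (i : Int) (j : Int)
        = if pn = i ∧ qn = j then 0 else get2 g (i : Int) (j : Int) := by
  obtain ⟨hlen, hrows⟩ := hg
  have hpl : pn < g.length := by omega
  have hrow : PySem.List.pyGetD g (pn : Int) [] = g[pn] := by
    rw [PySem.List.pyGetD_natCast, List.getD_eq_getElem?_getD, List.getElem?_eq_getElem hpl]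
    rfl
  have hrl : (g[pn]).length = w' := hrows _ (List.getElem_mem hpl)
  constructor
  · constructor
    · rw [PySem.List.pySetD_natCast, List.length_set]; exact hlen
    · intro r hr
      rw [PySem.List.pySetD_natCast] at hr
      rcases List.mem_or_eq_of_mem_set hr with h | h
      · exact hrows _ h
      · subst h
        rw [hrow, PySem.List.pySetD_natCast, List.length_set]
        exact hrl
  · intro i j hi hj
    rw [get2_nat, get2_nat, PySem.List.pySetD_natCast]
    by_cases hip : pn = i
    · subst hip
      rw [List.getD_eq_getElem?_getD (l := g.set pn _), List.getElem?_set_self (by omega)]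
      simp only [Option.getD_some]
      rw [hrow, PySem.List.pySetD_natCast]
      by_cases hjq : qn = j
      · subst hjq
        rw [List.getD_eq_getElem?_getD (l := g[pn].set qn 0), List.getElem?_set_self (by omega)]
        simp
      · rw [if_neg (by tauto), List.getD_eq_getElem?_getD (l := g[pn].set qn 0),
          List.getElem?_set_ne (by omega), List.getD_eq_getElem?_getD,
          show g.getD pn [] = g[pn] by rw [List.getD_eq_getElem?_getD, List.getElem?_eq_getElem hpl]; rfl]
    · rw [if_neg (by tauto), List.getD_eq_getElem?_getD (l := g.set pn _),
        List.getElem?_set_ne (by omega), ← List.getD_eq_getElem?_getD]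

-- a fold whose step touches only row rn of the grid
theorem row_local (v : Int → Int) (rn : Nat) :
    ∀ (L : List Int) (g : List (List Int)), rn < g.length →
      L.foldl (fun g j => PySem.List.pySetD g (rn : Int)
          (PySem.List.pySetD (PySem.List.pyGetD g (rn : Int) []) (j - 2) (v j))) g
        = PySem.List.pySetD g (rn : Int)
            (L.foldl (fun row j => PySem.List.pySetD row (j - 2) (v j))
              (PySem.List.pyGetD g (rn : Int) [])) := by
  intro L
  induction L with
  | nil =>
    intro g hg
    simp only [List.foldl_nil]
    rw [PySem.List.pySetD_natCast, PySem.List.pyGetD_natCast,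
      List.getD_eq_getElem?_getD, List.getElem?_eq_getElem hg]
    simp
  | cons x L ih =>
    intro g hg
    simp only [List.foldl_cons]
    rw [ih _ (by rw [PySem.List.pySetD_natCast, List.length_set]; exact hg)]
    simp only [PySem.List.pySetD_natCast, PySem.List.pyGetD_natCast]
    rw [List.getD_eq_getElem?_getD (l := g.set rn _), List.getElem?_set_self (by omega)]
    simp only [Option.getD_some, List.set_set]

theorem foldl_congr_inv {α β : Type} (inv : α → Prop) (f g : α → β → α) :
    ∀ (L : List β) (a : α), inv a → (∀ a' b, inv a' → b ∈ L → f a' b = g a' b ∧ inv (f a' b)) →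
      L.foldl f a = L.foldl g a := by
  intro L
  induction L with
  | nil => intro a _ _; rfl
  | cons x L ih =>
    intro a ha hfg
    obtain ⟨heq, hinv⟩ := hfg a x ha (List.mem_cons_self)
    simp only [List.foldl_cons, heq]
    exact ih _ (heq ▸ hinv) (fun a' b ha' hb => hfg a' b ha' (List.mem_cons_of_mem _ hb))

-- the kernel as a literal (same as the port's) and helper facts about it
def kernelLit : List (List Int) := [[0,0,1,0,0],[0,1,1,1,0],[1,1,1,1,1],[0,1,1,1,0],[0,0,1,0,0]]

theorem kernLookup : ∀ k ∈ ([-2,-1,0,1,2] : List Int), ∀ l ∈ ([-2,-1,0,1,2] : List Int),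
    PySem.List.pyGetD (PySem.List.pyGetD kernelLit (k + 2) []) (l + 2) 0
      = if (k + 2, l + 2) ∈ kernelOffsets then 1 else 0 := by decide

theorem lits_bounds : ∀ k ∈ ([-2,-1,0,1,2] : List Int), -2 ≤ k ∧ k < 3 := by decide

theorem offs_mem_lits : ∀ kl ∈ kernelOffsets,
    kl.1 - 2 ∈ ([-2,-1,0,1,2] : List Int) ∧ kl.2 - 2 ∈ ([-2,-1,0,1,2] : List Int) := by decide

theorem offs_bounds : ∀ kl ∈ kernelOffsets, 0 ≤ kl.1 ∧ kl.1 ≤ 4 ∧ 0 ≤ kl.2 ∧ kl.2 ≤ 4 := by decide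

-- the eroded condition at output cell (x, y)
def condb (pixel : List (List Int)) (w h : Int) (x y : Int) : Bool :=
  kernelOffsets.any (fun kl => vf pixel w h (x + kl.1) (y + kl.2) == 0)

theorem condb_iff (pixel : List (List Int)) (w h : Int) (x y : Int) :
    condb pixel w h x y = true ↔ ∃ kl ∈ kernelOffsets, vf pixel w h (x + kl.1) (y + kl.2) = 0 := by
  unfold condb
  simp [List.any_eq_true]

def target (pixel : List (List Int)) (w h : Int) : List (List Int) :=
  (List.range h.toNat).map (fun (ti : Nat) =>
    (List.range w.toNat).map (fun (tj : Nat) =>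
      if condb pixel w h (ti : Int) (tj : Int) then (0 : Int) else 255))

theorem get2_padded' (pixel : List (List Int)) (w h : Int) (hh : 0 ≤ h)
    (hlen : pixel.length = h.toNat) (hrows : ∀ r ∈ pixel, r.length = w.toNat)
    (t c : Int) (ht : 0 ≤ t) (hc : 0 ≤ c) :
    get2 (zrow w :: zrow w :: (pixel.map padRow ++ [zrow w, zrow w])) t c
      = vf pixel w h t c := by
  obtain ⟨tn, rfl⟩ := Int.eq_ofNat_of_zero_le ht
  obtain ⟨cn, rfl⟩ := Int.eq_ofNat_of_zero_le hc
  exact get2_padded pixel w h hh hlen hrows tn cn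

theorem condA_iff (pixel : List (List Int)) (w h : Int) (hh : 0 ≤ h)
    (hlen : pixel.length = h.toNat) (hrows : ∀ r ∈ pixel, r.length = w.toNat)
    (i j : Int) (hi : 2 ≤ i) (hj : 2 ≤ j) :
    ((∃ k ∈ ([-2,-1,0,1,2] : List Int), ∃ l ∈ ([-2,-1,0,1,2] : List Int),
        get2 (zrow w :: zrow w :: (pixel.map padRow ++ [zrow w, zrow w])) (i + k) (j + l) = 0 ∧
        PySem.List.pyGetD (PySem.List.pyGetD kernelLit (k + 2) []) (l + 2) 0 = 1)
      ↔ condb pixel w h (i - 2) (j - 2) = true) := by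
  rw [condb_iff]
  constructor
  · rintro ⟨k, hk, l, hl, hv, hkern⟩
    rw [kernLookup k hk l hl] at hkern
    by_cases hmem : (k + 2, l + 2) ∈ kernelOffsets
    · refine ⟨(k + 2, l + 2), hmem, ?_⟩
      have hkb := lits_bounds k hk
      have hlb := lits_bounds l hl
      rw [get2_padded' pixel w h hh hlen hrows (i + k) (j + l) (by omega) (by omega)] at hv
      rw [show i - 2 + (k + 2, l + 2).1 = i + k by norm_num,
        show j - 2 + (k + 2, l + 2).2 = j + l by norm_num]
      exact hv
    · rw [if_neg hmem] at hkern
      exact absurd hkern (by norm_num)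
  · rintro ⟨kl, hkl, hv⟩
    obtain ⟨hm1, hm2⟩ := offs_mem_lits kl hkl
    have hb := offs_bounds kl hkl
    refine ⟨kl.1 - 2, hm1, kl.2 - 2, hm2, ?_, ?_⟩
    · rw [get2_padded' pixel w h hh hlen hrows _ _ (by omega) (by omega),
        show i + (kl.1 - 2) = i - 2 + kl.1 by ring, show j + (kl.2 - 2) = j - 2 + kl.2 by ring]
      exact hv
    · rw [kernLookup _ hm1 _ hm2, if_pos (by simpa using hkl)]

-- ===== A: padding result =====
theorem padding_eq (pixel : List (List Int)) (h : Int) (hh : 0 ≤ h)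
    (hlen : pixel.length = h.toNat) :
    (PySem.List.pyRange 0 h 1).foldl
        (fun pa i => PySem.List.pySetD pa i
          (PySem.List.insert (PySem.List.insert ((PySem.List.pyGetD pa i [] ++ [0]) ++ [0]) 0 0) 0 0))
        pixel
      = pixel.map padRow := by
  have H := foldl_overwrite (fun (_ : Int) r => padRow r) ([] : List Int) 0 pixel []
  simp only [List.length_nil, Nat.cast_zero, add_zero, zero_add, List.nil_append,
    Int.sub_zero] at H
  have hstep : (fun (pa : List (List Int)) (i : Int) => PySem.List.pySetD pa i
        (PySem.List.insert (PySem.List.insert ((PySem.List.pyGetD pa i [] ++ [0]) ++ [0]) 0 0) 0 0))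
      = (fun pa i => PySem.List.pySetD pa i (padRow (PySem.List.pyGetD pa i []))) := by
    funext pa i
    rw [PySem.List.insert_zero, PySem.List.insert_zero]
    rfl
  rw [show h = (pixel.length : Int) by omega, hstep, H]
  apply List.ext_getElem (by simp)
  intro k h1 h2
  simp only [List.getElem_map, List.getElem_map, List.getElem_range]
  rw [List.getD_eq_getElem?_getD, List.getElem?_eq_getElem (by simpa using h1)]
  rfl

-- ===== A: the 5x5 fit-check value =====
theorem ev_eq (pixel : List (List Int)) (w h : Int) (hh : 0 ≤ h)
    (hlen : pixel.length = h.toNat) (hrows : ∀ r ∈ pixel, r.length = w.toNat)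
    (i j : Int) (hi : 2 ≤ i) (hj : 2 ≤ j) :
    (PySem.List.pyRange (-2) 3 1).foldl
        (fun (ev : Int) (k : Int) => (PySem.List.pyRange (-2) 3 1).foldl
          (fun ev l =>
            if PySem.List.pyGetD (PySem.List.pyGetD
                  (zrow w :: zrow w :: (pixel.map padRow ++ [zrow w, zrow w])) (i + k) []) (j + l) 0 = 0 ∧
               PySem.List.pyGetD (PySem.List.pyGetD kernelLit (k + 2) []) (l + 2) 0 = 1
            then 0 else ev) ev) 255
      = if condb pixel w h (i - 2) (j - 2) then (0 : Int) else 255 := by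
  rw [show PySem.List.pyRange (-2) 3 1 = ([-2,-1,0,1,2] : List Int) from rfl]
  refine Eq.trans (List.foldl_ext _
      (fun (ev : Int) (k : Int) =>
        if (([-2,-1,0,1,2] : List Int)).any (fun l => decide
            (PySem.List.pyGetD (PySem.List.pyGetD
                (zrow w :: zrow w :: (pixel.map padRow ++ [zrow w, zrow w])) (i + k) []) (j + l) 0 = 0 ∧
             PySem.List.pyGetD (PySem.List.pyGetD kernelLit (k + 2) []) (l + 2) 0 = 1))
        then 0 else ev)
      255 (fun a' b _ => foldl_ifzero _ _ a')) ?_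
  refine Eq.trans (foldl_ifzero
    (fun k => (([-2,-1,0,1,2] : List Int)).any (fun l => decide
            (PySem.List.pyGetD (PySem.List.pyGetD
                (zrow w :: zrow w :: (pixel.map padRow ++ [zrow w, zrow w])) (i + k) []) (j + l) 0 = 0 ∧
             PySem.List.pyGetD (PySem.List.pyGetD kernelLit (k + 2) []) (l + 2) 0 = 1)) = true)
    ([-2,-1,0,1,2] : List Int) 255) ?_
  have hcond : (([-2,-1,0,1,2] : List Int).any (fun k => decide ((([-2,-1,0,1,2] : List Int)).any (fun l => decide
            (PySem.List.pyGetD (PySem.List.pyGetD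
                (zrow w :: zrow w :: (pixel.map padRow ++ [zrow w, zrow w])) (i + k) []) (j + l) 0 = 0 ∧
             PySem.List.pyGetD (PySem.List.pyGetD kernelLit (k + 2) []) (l + 2) 0 = 1)) = true)))
      = condb pixel w h (i - 2) (j - 2) := by
    rcases hcb : condb pixel w h (i - 2) (j - 2) with _ | _
    · rw [List.any_eq_false]
      intro k hk
      simp only [decide_eq_true_eq]
      intro hex
      rw [List.any_eq_true] at hex
      obtain ⟨l, hl, hll⟩ := hex
      rw [decide_eq_true_eq] at hll
      have : condb pixel w h (i - 2) (j - 2) = true :=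
        (condA_iff pixel w h hh hlen hrows i j hi hj).mp ⟨k, hk, l, hl, hll.1, hll.2⟩
      rw [hcb] at this
      exact Bool.false_ne_true this
    · obtain ⟨k, hk, l, hl, h1', h2'⟩ := (condA_iff pixel w h hh hlen hrows i j hi hj).mpr hcb
      rw [List.any_eq_true]
      refine ⟨k, hk, ?_⟩
      rw [decide_eq_true_eq, List.any_eq_true]
      refine ⟨l, hl, ?_⟩
      rw [decide_eq_true_eq]
      exact ⟨h1', h2'⟩
  rw [hcond]

-- ===== A: initial grid =====
theorem createInit_eq (w h : Int) :
    createInitializedGreyscalePixelArray w h 0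
      = List.replicate h.toNat (List.replicate w.toNat (0 : Int)) := by
  unfold createInitializedGreyscalePixelArray
  have hrow : (PySem.List.pyRange 0 w 1).foldl (fun (r : List Int) _ => r ++ [(0 : Int)]) []
      = List.replicate w.toNat 0 := by
    rw [PySem.List.foldl_append_singleton_eq_map, List.nil_append, List.map_const',
      PySem.List.length_pyRange_one]
    norm_num
  rw [PySem.List.foldl_append_singleton_eq_map, List.nil_append]
  simp only [hrow]
  rw [List.map_const', PySem.List.length_pyRange_one]
  norm_num

-- range-starts-at-0 corollary of foldl_overwrite
theorem foldl_overwrite0 {α : Type} (f : Int → α → α) (d : α) (off : Int) (xs : List α)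
    (a b : Int) (ha : a = off) (hb : b = off + xs.length) :
    (PySem.List.pyRange a b 1).foldl
        (fun s i => PySem.List.pySetD s (i - off) (f i (PySem.List.pyGetD s (i - off) d))) xs
      = (List.range xs.length).map (fun (t : Nat) => f (off + (t : Int)) (xs.getD t d)) := by
  rw [ha, hb]
  have H := foldl_overwrite f d off xs []
  simp only [List.length_nil, Nat.cast_zero, add_zero, List.nil_append] at H
  exact H

-- A's inner 5x5 fit-check loop, as a function
def evA (pixel : List (List Int)) (w : Int) (i j : Int) : Int :=
  (PySem.List.pyRange (-2) 3 1).foldl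
    (fun (ev : Int) (k : Int) => (PySem.List.pyRange (-2) 3 1).foldl
      (fun ev l =>
        if PySem.List.pyGetD (PySem.List.pyGetD
              (zrow w :: zrow w :: (pixel.map padRow ++ [zrow w, zrow w])) (i + k) []) (j + l) 0 = 0 ∧
           PySem.List.pyGetD (PySem.List.pyGetD kernelLit (k + 2) []) (l + 2) 0 = 1
        then 0 else ev) ev) 255

theorem evA_eq (pixel : List (List Int)) (w h : Int) (hh : 0 ≤ h)
    (hlen : pixel.length = h.toNat) (hrows : ∀ r ∈ pixel, r.length = w.toNat)
    (i j : Int) (hi : 2 ≤ i) (hj : 2 ≤ j) :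
    evA pixel w i j = if condb pixel w h (i - 2) (j - 2) then (0 : Int) else 255 := by
  unfold evA
  exact ev_eq pixel w h hh hlen hrows i j hi hj

theorem a_eq_target (pixel : List (List Int)) (w h : Int)
    (hw : 0 ≤ w) (hh : 0 ≤ h) (hlen : pixel.length = h.toNat)
    (hrows : ∀ row ∈ pixel, row.length = w.toNat) :
    computeErosion5x5CircularSE pixel w h = target pixel w h := by
  simp only [computeErosion5x5CircularSE]
  rw [padding_eq pixel h hh hlen,
    show PySem.List.pyRepeat [(0 : Int)] (w + 4) = zrow w from rfl]
  simp only [PySem.List.insert_zero]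
  simp only [List.append_assoc, List.cons_append, List.nil_append]
  rw [show ([[0,0,1,0,0],[0,1,1,1,0],[1,1,1,1,1],[0,1,1,1,0],[0,0,1,0,0]] : List (List Int))
        = kernelLit from rfl,
    createInit_eq w h]
  refine Eq.trans (foldl_congr_inv (fun (g : List (List Int)) => g.length = h.toNat) _
    (fun s i => PySem.List.pySetD s (i - 2)
      ((PySem.List.pyRange 2 (w + 2) 1).foldl
        (fun row j => PySem.List.pySetD row (j - 2) (evA pixel w i j))
        (PySem.List.pyGetD s (i - 2) [])))
    (PySem.List.pyRange 2 (h + 2) 1)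
    (List.replicate h.toNat (List.replicate w.toNat 0))
    (by simp) ?_) ?_
  · intro a' b ha' hb
    rw [PySem.List.mem_pyRange_one] at hb
    obtain ⟨rn, hrn⟩ : ∃ rn : Nat, b - 2 = (rn : Int) :=
      ⟨(b - 2).toNat, by omega⟩
    have hrnlt : rn < a'.length := by omega
    constructor
    · show (PySem.List.pyRange 2 (w + 2) 1).foldl
          (fun g j => PySem.List.pySetD g (b - 2)
            (PySem.List.pySetD (PySem.List.pyGetD g (b - 2) []) (j - 2) (evA pixel w b j))) a'
        = PySem.List.pySetD a' (b - 2)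
            ((PySem.List.pyRange 2 (w + 2) 1).foldl
              (fun row j => PySem.List.pySetD row (j - 2) (evA pixel w b j))
              (PySem.List.pyGetD a' (b - 2) []))
      rw [hrn]
      exact row_local (fun j => evA pixel w b j) rn _ a' hrnlt
    · show ((PySem.List.pyRange 2 (w + 2) 1).foldl
          (fun g j => PySem.List.pySetD g (b - 2)
            (PySem.List.pySetD (PySem.List.pyGetD g (b - 2) []) (j - 2) (evA pixel w b j))) a').length
        = h.toNat
      rw [hrn, row_local (fun j => evA pixel w b j) rn _ a' hrnlt,
        PySem.List.pySetD_natCast, List.length_set, ha']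
  refine Eq.trans (foldl_overwrite0
    (fun i row => (PySem.List.pyRange 2 (w + 2) 1).foldl
      (fun row j => PySem.List.pySetD row (j - 2) (evA pixel w i j)) row)
    [] 2 (List.replicate h.toNat (List.replicate w.toNat 0)) 2 (h + 2) rfl
    (by simp; omega)) ?_
  unfold target
  rw [List.length_replicate]
  apply List.map_congr_left
  intro t ht
  rw [List.mem_range] at ht
  rw [List.getD_eq_getElem?_getD, List.getElem?_replicate, if_pos ht]
  simp only [Option.getD_some]
  refine Eq.trans (foldl_overwrite0
    (fun j (_ : Int) => evA pixel w (2 + (t : Int)) j) 0 2 (List.replicate w.toNat 0)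
    2 (w + 2) rfl (by simp; omega)) ?_
  rw [List.length_replicate]
  apply List.map_congr_left
  intro tj htj
  rw [List.mem_range] at htj
  simp only []
  rw [evA_eq pixel w h hh hlen hrows (2 + (t : Int)) (2 + (tj : Int)) (by omega) (by omega)]
  rw [show 2 + (t : Int) - 2 = (t : Int) by ring, show 2 + (tj : Int) - 2 = (tj : Int) by ring]

-- scatter hit tests for B
def hitC (a b : Int) (kl : Int × Int) (i j : Nat) : Bool :=
  (a - kl.1 == (i : Int)) && (b - kl.2 == (j : Int))

def hitB (pixel : List (List Int)) (w h : Int) (a b : Int) (i j : Nat) : Bool :=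
  (vf pixel w h a b == 0) && kernelOffsets.any (fun kl => hitC a b kl i j)

def hitA (pixel : List (List Int)) (w h : Int) (a : Int) (i j : Nat) : Bool :=
  (PySem.List.pyRange 0 (w + 4) 1).any (fun b => hitB pixel w h a b i j)

theorem level3 (_pixel : List (List Int)) (w h : Int) (a b : Int) :
    ∀ (g : List (List Int)), Shape h.toNat w.toNat g →
      Shape h.toNat w.toNat (kernelOffsets.foldl (fun eroded kl =>
        if 0 ≤ a - kl.1 ∧ a - kl.1 < h ∧ 0 ≤ b - kl.2 ∧ b - kl.2 < w then
          PySem.List.pySetD eroded (a - kl.1)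
            (PySem.List.pySetD (PySem.List.pyGetD eroded (a - kl.1) []) (b - kl.2) 0)
        else eroded) g) ∧
      ∀ i j : Nat, i < h.toNat → j < w.toNat →
        get2 (kernelOffsets.foldl (fun eroded kl =>
          if 0 ≤ a - kl.1 ∧ a - kl.1 < h ∧ 0 ≤ b - kl.2 ∧ b - kl.2 < w then
            PySem.List.pySetD eroded (a - kl.1)
              (PySem.List.pySetD (PySem.List.pyGetD eroded (a - kl.1) []) (b - kl.2) 0)
          else eroded) g) (i : Int) (j : Int)
          = if kernelOffsets.any (fun kl => hitC a b kl i j) then 0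
            else get2 g (i : Int) (j : Int) := by
  intro g hg
  refine scatter_fold h.toNat w.toNat _ (fun kl i j => hitC a b kl i j) ?_ kernelOffsets g hg
  intro g' kl hg'
  simp only []
  by_cases hgd : 0 ≤ a - kl.1 ∧ a - kl.1 < h ∧ 0 ≤ b - kl.2 ∧ b - kl.2 < w
  · obtain ⟨pn, hpn⟩ : ∃ pn : Nat, a - kl.1 = (pn : Int) := ⟨(a - kl.1).toNat, by omega⟩
    obtain ⟨qn, hqn⟩ : ∃ qn : Nat, b - kl.2 = (qn : Int) := ⟨(b - kl.2).toNat, by omega⟩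
    have hpn' : pn < h.toNat := by omega
    have hqn' : qn < w.toNat := by omega
    have HW := get2_write h.toNat w.toNat g' hg' pn qn hpn' hqn'
    constructor
    · rw [if_pos hgd, hpn, hqn]
      exact HW.1
    · intro i j hi hj
      rw [if_pos hgd, hpn, hqn, HW.2 i j hi hj]
      have hiff : (hitC a b kl i j = true) ↔ (pn = i ∧ qn = j) := by
        simp only [hitC, hpn, hqn, Bool.and_eq_true, beq_iff_eq, Nat.cast_inj]
      by_cases hij : pn = i ∧ qn = j
      · rw [if_pos hij, if_pos (hiff.mpr hij)]
      · rw [if_neg hij, if_neg (fun hc => hij (hiff.mp hc))]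
  · constructor
    · rw [if_neg hgd]
      exact hg'
    · intro i j hi hj
      rw [if_neg hgd, if_neg ?_]
      simp only [hitC, Bool.and_eq_true, beq_iff_eq]
      intro hc
      exact hgd (by omega)

theorem level2 (pixel : List (List Int)) (w h : Int) (a : Int) :
    ∀ (g : List (List Int)), Shape h.toNat w.toNat g →
      Shape h.toNat w.toNat ((PySem.List.pyRange 0 (w + 4) 1).foldl (fun eroded b =>
        if (if 2 ≤ a ∧ a < h + 2 ∧ 2 ≤ b ∧ b < w + 2
            then PySem.List.pyGetD (PySem.List.pyGetD pixel (a - 2) []) (b - 2) 0 else 0) = 0 then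
          kernelOffsets.foldl (fun eroded kl =>
            if 0 ≤ a - kl.1 ∧ a - kl.1 < h ∧ 0 ≤ b - kl.2 ∧ b - kl.2 < w then
              PySem.List.pySetD eroded (a - kl.1)
                (PySem.List.pySetD (PySem.List.pyGetD eroded (a - kl.1) []) (b - kl.2) 0)
            else eroded) eroded
        else eroded) g) ∧
      ∀ i j : Nat, i < h.toNat → j < w.toNat →
        get2 ((PySem.List.pyRange 0 (w + 4) 1).foldl (fun eroded b =>
          if (if 2 ≤ a ∧ a < h + 2 ∧ 2 ≤ b ∧ b < w + 2
              then PySem.List.pyGetD (PySem.List.pyGetD pixel (a - 2) []) (b - 2) 0 else 0) = 0 then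
            kernelOffsets.foldl (fun eroded kl =>
              if 0 ≤ a - kl.1 ∧ a - kl.1 < h ∧ 0 ≤ b - kl.2 ∧ b - kl.2 < w then
                PySem.List.pySetD eroded (a - kl.1)
                  (PySem.List.pySetD (PySem.List.pyGetD eroded (a - kl.1) []) (b - kl.2) 0)
              else eroded) eroded
          else eroded) g) (i : Int) (j : Int)
          = if hitA pixel w h a i j then 0 else get2 g (i : Int) (j : Int) := by
  intro g hg
  refine scatter_fold h.toNat w.toNat _ (fun b i j => hitB pixel w h a b i j) ?_
    (PySem.List.pyRange 0 (w + 4) 1) g hg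
  intro g' b hg'
  simp only []
  by_cases hv : vf pixel w h a b = 0
  · have hv' : (if 2 ≤ a ∧ a < h + 2 ∧ 2 ≤ b ∧ b < w + 2
        then PySem.List.pyGetD (PySem.List.pyGetD pixel (a - 2) []) (b - 2) 0 else 0) = 0 := hv
    obtain ⟨h3s, h3c⟩ := level3 pixel w h a b g' hg'
    constructor
    · rw [if_pos hv']
      exact h3s
    · intro i j hi hj
      rw [if_pos hv', h3c i j hi hj]
      exact if_congr (by simp [hitB, hv]) rfl rfl
  · have hv' : ¬ ((if 2 ≤ a ∧ a < h + 2 ∧ 2 ≤ b ∧ b < w + 2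
        then PySem.List.pyGetD (PySem.List.pyGetD pixel (a - 2) []) (b - 2) 0 else 0) = 0) := hv
    constructor
    · rw [if_neg hv']
      exact hg'
    · intro i j hi hj
      rw [if_neg hv', if_neg ?_]
      simp only [hitB, Bool.and_eq_true, beq_iff_eq]
      intro hc
      exact hv hc.1

theorem getElem_get2 (g : List (List Int)) (n m : Nat) (hn : n < g.length)
    (hm : m < (g[n]).length) : g[n][m] = get2 g (n : Int) (m : Int) := by
  rw [get2_nat, List.getD_eq_getElem?_getD (l := g), List.getElem?_eq_getElem hn]
  simp only [Option.getD_some]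
  rw [List.getD_eq_getElem?_getD, List.getElem?_eq_getElem hm]
  rfl

theorem condB_eq (pixel : List (List Int)) (w h : Int)
    (n m : Nat) (hn : n < h.toNat) (hm : m < w.toNat) :
    (PySem.List.pyRange 0 (h + 4) 1).any (fun a => hitA pixel w h a n m)
      = condb pixel w h (n : Int) (m : Int) := by
  rcases hcb : condb pixel w h (n : Int) (m : Int) with _ | _
  · rw [List.any_eq_false]
    intro a ha hcontra
    simp only [hitA, hitB, hitC, List.any_eq_true, Bool.and_eq_true, beq_iff_eq] at hcontra
    obtain ⟨b, hb, hvb, kl, hkl, hk1, hk2⟩ := hcontra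
    have : condb pixel w h (n : Int) (m : Int) = true := by
      rw [condb_iff]
      refine ⟨kl, hkl, ?_⟩
      rw [show (n : Int) + kl.1 = a by omega, show (m : Int) + kl.2 = b by omega]
      exact hvb
    rw [hcb] at this
    exact Bool.false_ne_true this
  · rw [List.any_eq_true]
    rw [condb_iff] at hcb
    obtain ⟨kl, hkl, hv⟩ := hcb
    have hb := offs_bounds kl hkl
    have hnh : (n : Int) < h := by omega
    have hmw : (m : Int) < w := by omega
    refine ⟨(n : Int) + kl.1, ?_, ?_⟩
    · rw [PySem.List.mem_pyRange_one]
      constructor <;> omega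
    · simp only [hitA, hitB, hitC, List.any_eq_true, Bool.and_eq_true, beq_iff_eq]
      refine ⟨(m : Int) + kl.2, ?_, hv, kl, hkl, by ring, by ring⟩
      rw [PySem.List.mem_pyRange_one]
      constructor <;> omega

theorem b_eq_target (pixel : List (List Int)) (w h : Int) :
    computeErosion5x5CircularSE_alt pixel w h = target pixel w h := by
  simp only [computeErosion5x5CircularSE_alt]
  have hShape0 : Shape h.toNat w.toNat
      ((PySem.List.pyRange 0 h 1).map (fun _ => PySem.List.pyRepeat [(255 : Int)] w)) := by
    constructor
    · rw [List.length_map, PySem.List.length_pyRange_one]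
      omega
    · intro r hr
      rw [List.mem_map] at hr
      obtain ⟨_, _, rfl⟩ := hr
      rw [PySem.List.pyRepeat_singleton, List.length_replicate]
  have hget0 : ∀ i j : Nat, i < h.toNat → j < w.toNat →
      get2 ((PySem.List.pyRange 0 h 1).map (fun _ => PySem.List.pyRepeat [(255 : Int)] w))
        (i : Int) (j : Int) = 255 := by
    intro i j hi hj
    rw [get2_nat, List.getD_eq_getElem?_getD (l := List.map _ _), List.getElem?_map,
      List.getElem?_eq_getElem (by rw [PySem.List.length_pyRange_one]; omega)]
    simp only [Option.map_some, Option.getD_some]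
    rw [PySem.List.pyRepeat_singleton, List.getD_eq_getElem?_getD, List.getElem?_replicate,
      if_pos (by omega)]
    rfl
  obtain ⟨hsh, hchar⟩ := scatter_fold h.toNat w.toNat _
    (fun a i j => hitA pixel w h a i j)
    (fun g a hg => level2 pixel w h a g hg)
    (PySem.List.pyRange 0 (h + 4) 1)
    ((PySem.List.pyRange 0 h 1).map (fun _ => PySem.List.pyRepeat [(255 : Int)] w))
    hShape0
  apply List.ext_getElem
  · rw [hsh.1]
    simp [target]
  intro n h1 h2
  apply List.ext_getElem
  · rw [hsh.2 _ (List.getElem_mem h1)]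
    simp [target]
  intro m hm1 hm2
  have hn' : n < h.toNat := by rw [hsh.1] at h1; exact h1
  have hm' : m < w.toNat := by rw [hsh.2 _ (List.getElem_mem h1)] at hm1; exact hm1
  rw [getElem_get2 _ n m h1 hm1, hchar n m hn' hm', hget0 n m hn' hm', condB_eq pixel w h n m hn' hm']
  simp only [target, List.getElem_map, List.getElem_range]

theorem foldl_id {α β : Type} : ∀ (L : List β) (init : α), L.foldl (fun a _ => a) init = init := by
  intro L
  induction L with
  | nil => intro init; rfl
  | cons x L ih => intro init; exact ih init

theorem a_eq_target_h0 (pixel : List (List Int)) (w h : Int) (hh : h ≤ 0) :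
    computeErosion5x5CircularSE pixel w h = target pixel w h := by
  simp only [computeErosion5x5CircularSE]
  rw [createInit_eq, PySem.List.pyRange_one_eq_nil (show h + 2 ≤ 2 by omega)]
  simp only [List.foldl_nil]
  unfold target
  rw [show h.toNat = 0 by omega]
  rfl

theorem a_eq_target_w0 (pixel : List (List Int)) (w h : Int) (hw : w ≤ 0) :
    computeErosion5x5CircularSE pixel w h = target pixel w h := by
  simp only [computeErosion5x5CircularSE]
  rw [createInit_eq, PySem.List.pyRange_one_eq_nil (show w + 2 ≤ 2 by omega)]
  simp only [List.foldl_nil, foldl_id]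
  unfold target
  rw [show w.toNat = 0 by omega]
  simp [List.map_const']

-- ===== VERDICT (by name: the statement is the Claim_ definition above) =====
theorem computeErosion5x5CircularSE_spec : Claim_equal_computeErosion5x5CircularSE := by
  intro pixel w h _ hpre
  unfold Spec_computeErosion5x5CircularSE
  rw [b_eq_target pixel w h]
  rcases hpre with hh0 | ⟨hw0, _⟩ | ⟨hw, hh, hlen, hrows⟩
  · exact a_eq_target_h0 pixel w h hh0
  · exact a_eq_target_w0 pixel w h hw0
  · exact a_eq_target pixel w h (by omega) (by omega) hlen hrows
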